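-- pv_equiv track=rewrite | github.com/xiaohuahua1/Ct-Transformer | DNNmodel/old/testNC.py | search
-- ===== SOURCE A (Python) =====
-- def search(pat, txt):#找到pat在txt子串的第一次出现位置
--         i, N = 0, len(txt)
--         j, M = 0, len(pat)
--         while i < N and j < M:
--             if txt[i] == pat[j]:
--                 j = j + 1
--             else:
--                 i -= j
--                 j = 0
--             i = i + 1
--         if j == M:
--             return i - M
--         else:
--             return -1
-- ===== SOURCE B (Python) =====
-- def search(pat, txt):
--     return txt.find(pat)
-- ===== Notes on version B (the rewrite author's own statement) =====
-- stated objective: idiomatic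
-- what changed: Replaced the hand-written backtracking character-by-character scan with Python's built-in str.find, which returns the same first-occurrence index (or -1).
import Mathlib
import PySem

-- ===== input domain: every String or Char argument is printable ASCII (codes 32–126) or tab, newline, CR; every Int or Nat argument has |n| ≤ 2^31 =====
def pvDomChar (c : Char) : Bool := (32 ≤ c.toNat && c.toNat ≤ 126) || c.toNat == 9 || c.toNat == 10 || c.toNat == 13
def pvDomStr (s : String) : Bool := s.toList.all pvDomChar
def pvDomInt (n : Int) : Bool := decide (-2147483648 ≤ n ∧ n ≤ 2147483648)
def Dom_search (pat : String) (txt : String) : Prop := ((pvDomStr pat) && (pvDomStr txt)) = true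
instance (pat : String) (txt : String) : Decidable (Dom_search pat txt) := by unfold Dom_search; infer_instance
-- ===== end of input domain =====

-- B replaces A's hand-written backtracking scan by the idiomatic txt.find(pat); both return the
-- first occurrence index of pat in txt, or -1.

-- ===== PORT A =====
-- A's while loop, step for step: on a match advance j, on a mismatch back i up to the start of
-- the current attempt (i -= j; j = 0), then i += 1; exit tests in the same order.
def searchLoop (t p : List Char) (i j : Nat) : Int :=
  if h : i < t.length ∧ j < p.length then
    if t[i]'h.1 = p[j]'h.2 then
      searchLoop t p (i + 1) (j + 1)
    else
      searchLoop t p (i - j + 1) 0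
  else
    if j = p.length then (i : Int) - (p.length : Int) else -1
termination_by (t.length - (i - j), p.length - j)
decreasing_by
  · have h1 : i + 1 - (j + 1) = i - j := by omega
    rw [h1]
    exact Prod.Lex.right _ (by omega)
  · exact Prod.Lex.left _ _ (by omega)

def search (pat : String) (txt : String) : Int :=
  searchLoop txt.toList pat.toList 0 0

-- ===== PORT B =====
def search_alt (pat : String) (txt : String) : Int :=
  PySem.Str.find txt pat

-- ===== PRECONDITION & SPEC =====
def Spec_search (pat : String) (txt : String) (out : Int) : Prop := out = search_alt pat txt
instance (pat : String) (txt : String) (out : Int) : Decidable (Spec_search pat txt out) := by unfold Spec_search; infer_instance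

-- ===== CLAIM (what is proved, stated in full; the proofs are below) =====
def Claim_equal_search : Prop := ∀ (pat : String) (txt : String), Dom_search pat txt → Spec_search pat txt (search pat txt)

-- ===== LEMMAS AND PROOFS =====

-- Loop invariant: i = (start of current attempt) + j, the first j chars of p match there,
-- and no attempt starting before i - j succeeds.
theorem searchLoop_eq_find (t p : List Char) (i j : Nat)
    (hji : j ≤ i) (hiN : i ≤ t.length) (hjM : j ≤ p.length)
    (hmatch : (t.drop (i - j)).take j = p.take j)
    (hno : ∀ s, s < i - j → ¬ p <+: t.drop s) :
    searchLoop t p i j = PySem.Chars.find t p := by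
  rw [searchLoop]
  by_cases h : i < t.length ∧ j < p.length
  · rw [dif_pos h]
    by_cases hc : t[i]'h.1 = p[j]'h.2
    · rw [if_pos hc]
      refine searchLoop_eq_find t p (i+1) (j+1) (by omega) (by omega) (by omega) ?_ ?_
      · have hs : i + 1 - (j + 1) = i - j := by omega
        rw [hs, List.take_add_one, List.take_add_one, hmatch]
        congr 1
        have h1 : (t.drop (i - j))[j]? = some (t[i]'h.1) := by
          rw [List.getElem?_drop]
          have hidx : i - j + j = i := by omega
          rw [hidx, List.getElem?_eq_getElem h.1]
        rw [h1, List.getElem?_eq_getElem h.2, hc]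
      · intro s hs
        exact hno s (by omega)
    · rw [if_neg hc]
      refine searchLoop_eq_find t p (i - j + 1) 0 (by omega) (by omega) (by omega) (by simp) ?_
      intro s hs
      rcases Nat.lt_succ_iff_lt_or_eq.mp (by omega : s < (i - j) + 1) with h' | h'
      · exact hno s h'
      · subst h'
        intro hpre
        apply hc
        have e := hpre.getElem h.2
        rw [List.getElem_drop] at e
        simp only [show i - j + j = i from by omega] at e
        exact e.symm
  · rw [dif_neg h]
    by_cases hj : j = p.length
    · rw [if_pos hj]
      subst hj
      have hpre : p <+: t.drop (i - p.length) := by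
        have hx := List.take_prefix p.length (t.drop (i - p.length))
        rwa [hmatch, List.take_length] at hx
      have hinf : p <:+: t := hpre.isInfix.trans (List.drop_suffix _ t).isInfix
      have hnn : 0 ≤ PySem.Chars.find t p := (PySem.Chars.find_nonneg_iff t p).mpr hinf
      obtain ⟨hp1, hp2⟩ := PySem.Chars.find_spec (s := t) (sub := p) hnn
      have heq : (PySem.Chars.find t p).toNat = i - p.length := by
        by_contra hne
        rcases Nat.lt_or_ge (PySem.Chars.find t p).toNat (i - p.length) with hlt | hge
        · exact hno _ hlt hp1
        · exact hp2 _ (by omega) hpre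
      omega
    · rw [if_neg hj]
      symm
      apply (PySem.Chars.find_eq_neg_one_iff t p).mpr
      intro hinf
      obtain ⟨s', t', htt⟩ := hinf
      have hpre : p <+: t.drop s'.length := by
        rw [← htt, List.append_assoc, List.drop_left]
        exact List.prefix_append p t'
      have hlen : p.length ≤ t.length - s'.length := by
        have hx := hpre.length_le
        simpa [List.length_drop] using hx
      exact hno s'.length (by omega) hpre
termination_by (t.length - (i - j), p.length - j)
decreasing_by
  · have h1 : i + 1 - (j + 1) = i - j := by omega
    rw [h1]
    exact Prod.Lex.right _ (by omega)
  · exact Prod.Lex.left _ _ (by omega)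

-- ===== VERDICT (by name: the statement is the Claim_ definition above) =====
theorem search_spec : Claim_equal_search := by
  intro pat txt _
  unfold Spec_search search search_alt
  rw [PySem.Str.find_eq]
  exact searchLoop_eq_find txt.toList pat.toList 0 0 (le_refl 0) (Nat.zero_le _) (Nat.zero_le _) (by simp) (by omega)
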